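-- pv_equiv track=rewrite | github.com/Darshan7575/Cartesian-Product-Image-Generator | relationgen.py | relationcreator
-- ===== SOURCE A (Python) =====
-- def relationcreator(set1,set2):
--     res = []
--     res.append('R')
--     res.append('=')
--     res.append('{')
--     for i in range(len(set1)):
--         for j in range(len(set2)):
--             res.append('(')
--             res.append(set1[i])
--             res.append(',')
--             res.append(set2[j])
--             res.append(')')
--             if i != (len(set1) - 1) or j != (len(set2) - 1):
--                 res.append(',')
--     res.append('}')
--     return(''.join(res))
-- ===== SOURCE B (Python) =====
-- def relationcreator(set1, set2):
--     if not set1 or not set2: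
--         return 'R={}'
--     rows = ('(' + x + ',' + ('),(' + x + ',').join(set2) + ')' for x in set1)
--     return 'R={' + ','.join(rows) + '}'
-- ===== Notes on version B (the rewrite author's own statement) =====
-- stated objective: alternative
-- what changed: Instead of A's token list built by a nested index loop with a manual trailing-comma branch, B never iterates over pairs at all: for each left element it builds the whole row with one join whose composite separator '),(x,' carries the repeated prefix, then joins the rows with ','.
import Mathlib
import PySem

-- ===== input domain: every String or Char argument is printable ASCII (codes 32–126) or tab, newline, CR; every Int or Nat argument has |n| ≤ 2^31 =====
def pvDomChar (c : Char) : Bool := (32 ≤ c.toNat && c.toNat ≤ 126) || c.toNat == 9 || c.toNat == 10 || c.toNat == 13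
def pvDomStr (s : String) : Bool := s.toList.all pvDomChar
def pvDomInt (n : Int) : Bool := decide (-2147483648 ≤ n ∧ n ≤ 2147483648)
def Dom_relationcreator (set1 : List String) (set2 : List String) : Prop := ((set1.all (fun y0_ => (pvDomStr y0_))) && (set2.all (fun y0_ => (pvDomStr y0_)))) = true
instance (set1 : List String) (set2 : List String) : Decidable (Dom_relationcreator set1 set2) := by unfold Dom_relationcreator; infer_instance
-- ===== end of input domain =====

-- B replaces A's nested index loop with its manual trailing-comma branch by one join per
-- left element using the composite separator '),(x,' (no iteration over individual pairs);
-- objective: alternative decomposition, same cost.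

-- ===== PORT A =====
def relationcreator (set1 : List String) (set2 : List String) : String :=
  let res : List String := []
  let res := res ++ ["R"]
  let res := res ++ ["="]
  let res := res ++ ["{"]
  let res := (PySem.List.pyRange 0 (set1.length : Int) 1).foldl (fun res i =>
    (PySem.List.pyRange 0 (set2.length : Int) 1).foldl (fun res j =>
      let res := res ++ ["("]
      let res := res ++ [PySem.List.pyGetD set1 i ""]  -- index i comes from range(len(set1)): always in bounds
      let res := res ++ [","]
      let res := res ++ [PySem.List.pyGetD set2 j ""]  -- index j comes from range(len(set2)): always in bounds
      let res := res ++ [")"]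
      if i ≠ (set1.length : Int) - 1 ∨ j ≠ (set2.length : Int) - 1 then res ++ [","] else res)
      res) res
  let res := res ++ ["}"]
  PySem.Str.join "" res

-- ===== PORT B =====
def relationcreator_alt (set1 : List String) (set2 : List String) : String :=
  if set1 = [] ∨ set2 = [] then "R={}"
  else
    let rows := set1.map (fun x => "(" ++ x ++ "," ++ PySem.Str.join ("),(" ++ x ++ ",") set2 ++ ")")
    "R={" ++ PySem.Str.join "," rows ++ "}"

-- ===== PRECONDITION & SPEC =====
def Spec_relationcreator (set1 : List String) (set2 : List String) (out : String) : Prop := out = relationcreator_alt set1 set2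
instance (set1 : List String) (set2 : List String) (out : String) : Decidable (Spec_relationcreator set1 set2 out) := by unfold Spec_relationcreator; infer_instance

-- ===== CLAIM (what is proved, stated in full; the proofs are below) =====
def Claim_equal_relationcreator : Prop := ∀ (set1 : List String) (set2 : List String), Dom_relationcreator set1 set2 → Spec_relationcreator set1 set2 (relationcreator set1 set2)

-- ===== LEMMAS AND PROOFS =====

-- proof-side normal form of the body: ','.join of all rendered pairs (neither port's code)
def pvPairsJoin (set1 set2 : List String) : String :=
  "R={" ++ PySem.Str.join "," (set1.flatMap (fun x => set2.map (fun y => "(" ++ x ++ "," ++ y ++ ")"))) ++ "}"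

-- ''.join is plain concatenation.
theorem join_empty_sep (P : List (List Char)) : PySem.Chars.join [] P = P.flatten := by
  induction P with
  | nil => simp [PySem.Chars.join_nil]
  | cons p rest ih =>
    cases rest with
    | nil => simp [PySem.Chars.join_singleton]
    | cons q t => simp [PySem.Chars.join_cons_cons, ih]

-- ','.join over a split list: every piece of the front part gets a trailing comma.
theorem join_comma_append (A B : List (List Char)) (hB : B ≠ []) :
    PySem.Chars.join [','] (A ++ B) =
      (A.map (· ++ [','])).flatten ++ PySem.Chars.join [','] B := by
  induction A with
  | nil => simp
  | cons a A ih =>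
    cases hAB : A ++ B with
    | nil => exact absurd (List.append_eq_nil_iff.mp hAB).2 hB
    | cons c t =>
      have : PySem.Chars.join [','] (a :: (A ++ B)) =
          a ++ [','] ++ PySem.Chars.join [','] (A ++ B) := by
        rw [hAB]; exact PySem.Chars.join_cons_cons _ _ _ _
      simp only [List.cons_append, this, ih, List.map_cons, List.flatten_cons]
      simp [List.append_assoc]

-- mem-congruence for flatMap
theorem flatMap_congr_mem {α β : Type} {l : List α} {f g : α → List β}
    (h : ∀ x ∈ l, f x = g x) : l.flatMap f = l.flatMap g := by
  rw [List.flatMap_def, List.flatMap_def, List.map_congr_left h]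

-- one row: comma after every pair except the last of the row
theorem row_lemma (q : Nat → List Char) (m' : Nat) :
    (List.range (m'+1)).flatMap (fun j => q j ++ if j = m' then [] else [','])
    = ((((List.range m').map q).map (· ++ [','])).flatten) ++ q m' := by
  rw [List.range_succ, List.flatMap_append, List.flatMap_singleton,
    flatMap_congr_mem (g := fun j => q j ++ [','])
      (by intro j hj; rw [if_neg (by simp at hj; omega)])]
  simp [List.flatMap_def, List.map_map, Function.comp_def]

-- the full grid: comma after every pair except the very last one = ','.join of all pairs
theorem grid (p : Nat → Nat → List Char) (n' m' : Nat) :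
    (List.range (n'+1)).flatMap (fun i => (List.range (m'+1)).flatMap (fun j =>
        p i j ++ if i = n' ∧ j = m' then [] else [',']))
    = PySem.Chars.join [','] ((List.range (n'+1)).flatMap (fun i => (List.range (m'+1)).map (p i))) := by
  have hrow : ∀ i, PySem.Chars.join [','] ((List.range (m'+1)).map (p i))
      = ((((List.range m').map (p i)).map (· ++ [','])).flatten) ++ p i m' := by
    intro i
    rw [List.range_succ (n := m'), List.map_append, List.map_singleton,
      join_comma_append _ _ (List.cons_ne_nil _ _), PySem.Chars.join_singleton]
  conv_rhs => rw [List.range_succ (n := n')]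
  rw [List.flatMap_append, List.flatMap_singleton, join_comma_append _ _ (by simp), hrow]
  conv_lhs => rw [List.range_succ (n := n')]
  rw [List.flatMap_append, List.flatMap_singleton]
  have hlast : (List.range (m'+1)).flatMap (fun j => p n' j ++ if n' = n' ∧ j = m' then [] else [','])
      = ((((List.range m').map (p n')).map (· ++ [','])).flatten) ++ p n' m' := by
    rw [flatMap_congr_mem (g := fun j => p n' j ++ if j = m' then [] else [','])
        (by intro j _; simp)]
    exact row_lemma (p n') m'
  rw [hlast]
  have hpre : (List.range n').flatMap (fun i => (List.range (m'+1)).flatMap (fun j =>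
        p i j ++ if i = n' ∧ j = m' then [] else [',']))
      = (((List.range n').flatMap (fun i => (List.range (m'+1)).map (p i))).map (· ++ [','])).flatten := by
    rw [flatMap_congr_mem (g := fun i => (List.range (m'+1)).flatMap (fun j => p i j ++ [',']))
        (by intro i hi
            exact flatMap_congr_mem (by intro j _; rw [if_neg (by simp at hi; omega)]))]
    rw [← List.flatMap_def, List.flatMap_assoc]
    simp only [List.flatMap_map]
  rw [hpre]

-- the character list of one rendered pair (proof-side normal form)
def pch (s1 s2 : List String) (i j : Nat) : List Char :=
  '(' :: ((PySem.List.pyGetD s1 (i : Int) "").toList ++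
    ',' :: ((PySem.List.pyGetD s2 (j : Int) "").toList ++ [')']))

-- the tokens one (i,j) iteration of A appends
def tokRow (set1 set2 : List String) (i j : Int) : List String :=
  ["(", PySem.List.pyGetD set1 i "", ",", PySem.List.pyGetD set2 j "", ")"] ++
    (if i ≠ (set1.length : Int) - 1 ∨ j ≠ (set2.length : Int) - 1 then [","] else [])

theorem loopInner_eq (set1 set2 : List String) (i : Int) (L : List Int) (acc : List String) :
    L.foldl (fun res j =>
      let res := res ++ ["("]
      let res := res ++ [PySem.List.pyGetD set1 i ""]
      let res := res ++ [","]
      let res := res ++ [PySem.List.pyGetD set2 j ""]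
      let res := res ++ [")"]
      if i ≠ (set1.length : Int) - 1 ∨ j ≠ (set2.length : Int) - 1 then res ++ [","] else res) acc
    = acc ++ L.flatMap (tokRow set1 set2 i) := by
  induction L generalizing acc with
  | nil => simp
  | cons j t ih =>
    simp only [List.foldl_cons, List.flatMap_cons, ih]
    dsimp only [tokRow]
    split_ifs <;> simp

theorem loopA_eq (set1 set2 : List String) (L : List Int) (acc : List String) :
    L.foldl (fun res i =>
      (PySem.List.pyRange 0 (set2.length : Int) 1).foldl (fun res j =>
        let res := res ++ ["("]
        let res := res ++ [PySem.List.pyGetD set1 i ""]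
        let res := res ++ [","]
        let res := res ++ [PySem.List.pyGetD set2 j ""]
        let res := res ++ [")"]
        if i ≠ (set1.length : Int) - 1 ∨ j ≠ (set2.length : Int) - 1 then res ++ [","] else res) res) acc
    = acc ++ L.flatMap (fun i => (PySem.List.pyRange 0 (set2.length : Int) 1).flatMap (tokRow set1 set2 i)) := by
  induction L generalizing acc with
  | nil => simp
  | cons i t ih =>
    rw [List.foldl_cons, ih, loopInner_eq, List.flatMap_cons, List.append_assoc]

theorem flatten_flatMap' {α β : Type} (l : List α) (F : α → List (List β)) :
    (l.flatMap F).flatten = l.flatMap (fun a => (F a).flatten) := by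
  induction l with
  | nil => simp
  | cons a t ih => simp [ih]

-- A's token stream flattens to the ','.join of all rendered pairs.
theorem core (set1 set2 : List String) :
    (((PySem.List.pyRange 0 (set1.length : Int) 1).flatMap (fun i =>
        (PySem.List.pyRange 0 (set2.length : Int) 1).flatMap (tokRow set1 set2 i))).map String.toList).flatten
    = PySem.Chars.join [','] ((set1.flatMap (fun x => set2.map (fun y => "(" ++ x ++ "," ++ y ++ ")"))).map String.toList) := by
  match set1, set2 with
  | [], s2 => simp
  | x :: xs, [] => simp [List.flatMap_def]
  | x :: xs, y :: ys =>
    conv_rhs => rw [← PySem.List.map_pyGetD_pyRange_zero' (x :: xs) ""]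
    conv_rhs => rw [← PySem.List.map_pyGetD_pyRange_zero' (y :: ys) ""]
    rw [List.flatMap_map]
    simp only [List.map_flatMap, List.map_map]
    simp only [flatten_flatMap']
    simp only [← List.flatMap_def]
    rw [PySem.List.pyRange_zero_natCast ((x :: xs).length),
      PySem.List.pyRange_zero_natCast ((y :: ys).length)]
    simp only [List.flatMap_map, List.map_map, Function.comp_def, List.length_cons]
    have hA : ∀ (i j : Nat),
        (tokRow (x :: xs) (y :: ys) (i : Int) (j : Int)).flatMap String.toList =
          pch (x :: xs) (y :: ys) i j ++
            (if (i : Int) ≠ ((x :: xs).length : Int) - 1 ∨ (j : Int) ≠ ((y :: ys).length : Int) - 1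
             then [','] else []) := by
      intro i j
      simp only [tokRow, pch]
      split_ifs <;> simp
    have hB : ∀ (i j : Nat),
        ("(" ++ PySem.List.pyGetD (x :: xs) (i : Int) "" ++ "," ++ PySem.List.pyGetD (y :: ys) (j : Int) "" ++ ")").toList
          = pch (x :: xs) (y :: ys) i j := by
      intro i j
      simp [pch]
    simp only [hA, hB]
    rw [flatMap_congr_mem (g := fun i => (List.range (ys.length + 1)).flatMap (fun j =>
        pch (x :: xs) (y :: ys) i j ++ if i = xs.length ∧ j = ys.length then [] else [',']))
      (by
        intro i hi
        refine flatMap_congr_mem ?_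
        intro j hj
        congr 1
        by_cases hc : i = xs.length ∧ j = ys.length
        · rw [if_pos hc, if_neg (by
            rcases hc with ⟨h1, h2⟩; subst h1; subst h2
            simp only [List.length_cons]; push_cast; omega)]
        · rw [if_neg hc, if_pos (by simp only [List.length_cons]; push_cast; omega)])]
    exact grid (pch (x :: xs) (y :: ys)) xs.length ys.length

-- A equals the pairs-join normal form.
theorem A_eq_pairsJoin (set1 set2 : List String) :
    relationcreator set1 set2 = pvPairsJoin set1 set2 := by
  apply String.ext
  unfold relationcreator pvPairsJoin
  dsimp only
  rw [loopA_eq]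
  rw [PySem.Str.toList_join, show ("" : String).toList = ([] : List Char) from rfl, join_empty_sep]
  simp only [String.toList_append, PySem.Str.toList_join, List.map_append, List.flatten_append,
    List.nil_append, List.map_cons, List.map_nil, List.flatten_cons, List.flatten_nil,
    show ("R" : String).toList = ['R'] from rfl, show ("=" : String).toList = ['='] from rfl,
    show ("{" : String).toList = ['{'] from rfl, show ("}" : String).toList = ['}'] from rfl,
    show ("R={" : String).toList = ['R', '=', '{'] from rfl,
    show ("," : String).toList = [','] from rfl]
  rw [core]
  simp

-- expanding one step of a join with a nonempty tail
theorem join_cons_ne (sep a : List Char) (t : List (List Char)) (ht : t ≠ []) :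
    PySem.Chars.join sep (a :: t) = a ++ sep ++ PySem.Chars.join sep t := by
  cases t with
  | nil => exact absurd rfl ht
  | cons b u => exact PySem.Chars.join_cons_cons sep a b u

-- one row by composite separator: '(x,' ++ ('),(x,').join(ys) ++ ')' = ','.join of the row's pairs
theorem row_sep (x : List Char) (s : List (List Char)) (hs : s ≠ []) :
    ['('] ++ x ++ [','] ++ PySem.Chars.join ([')', ','] ++ ('(' :: (x ++ [',']))) s ++ [')']
    = PySem.Chars.join [','] (s.map (fun y => ['('] ++ x ++ [','] ++ y ++ [')'])) := by
  induction s with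
  | nil => exact absurd rfl hs
  | cons a t ih =>
    cases t with
    | nil => simp [PySem.Chars.join_singleton]
    | cons b u =>
      conv_lhs => rw [join_cons_ne _ _ _ (by simp)]
      conv_rhs => rw [List.map_cons, join_cons_ne _ _ _ (by simp)]
      rw [← ih (by simp)]
      simp [List.append_assoc]

-- ','.join concatenates across a split into two nonempty halves with one comma between.
theorem join_split (A B : List (List Char)) (hA : A ≠ []) (hB : B ≠ []) :
    PySem.Chars.join [','] (A ++ B)
    = PySem.Chars.join [','] A ++ [','] ++ PySem.Chars.join [','] B := by
  induction A with
  | nil => exact absurd rfl hA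
  | cons a t ih =>
    cases t with
    | nil =>
      cases B with
      | nil => exact absurd rfl hB
      | cons b u =>
        rw [List.singleton_append, join_cons_ne _ _ _ (by simp), PySem.Chars.join_singleton]
    | cons c u =>
      rw [List.cons_append]
      rw [join_cons_ne _ _ _ (by simp), ih (by simp)]
      conv_rhs => rw [join_cons_ne _ _ _ (by simp)]
      simp [List.append_assoc]

-- ','.join of concatenated nonempty groups = ','.join of the per-group joins.
theorem join_groups {α : Type} (l : List α) (g : α → List (List Char))
    (h : ∀ x ∈ l, g x ≠ []) :
    PySem.Chars.join [','] (l.flatMap g)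
    = PySem.Chars.join [','] (l.map (fun x => PySem.Chars.join [','] (g x))) := by
  induction l with
  | nil => rfl
  | cons a t ih =>
    cases t with
    | nil => simp [PySem.Chars.join_singleton]
    | cons b u =>
      have hflat : (b :: u).flatMap g ≠ [] := by
        simp only [List.flatMap_cons]
        intro hc
        exact h b (by simp) (List.append_eq_nil_iff.mp hc).1
      rw [List.flatMap_cons, join_split _ _ (h a (by simp)) hflat,
        ih (fun x hx => h x (List.mem_cons_of_mem _ hx))]
      conv_rhs => rw [List.map_cons, join_cons_ne _ _ _ (by simp)]

-- B equals the pairs-join normal form.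
theorem B_eq_pairsJoin (set1 set2 : List String) :
    relationcreator_alt set1 set2 = pvPairsJoin set1 set2 := by
  unfold relationcreator_alt pvPairsJoin
  by_cases h : set1 = [] ∨ set2 = []
  · rw [if_pos h]
    rcases h with h | h
    · subst h; rfl
    · subst h; simp [List.flatMap_def, PySem.Str.join]
  · rw [if_neg h]
    have h1 : set1 ≠ [] := fun hh => h (Or.inl hh)
    have h2 : set2 ≠ [] := fun hh => h (Or.inr hh)
    apply String.ext
    dsimp only
    simp only [String.toList_append, PySem.Str.toList_join, List.map_map, Function.comp_def,
      show ("R={" : String).toList = ['R', '=', '{'] from rfl,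
      show ("}" : String).toList = ['}'] from rfl,
      show ("," : String).toList = [','] from rfl,
      show ("(" : String).toList = ['('] from rfl,
      show (")" : String).toList = [')'] from rfl,
      show ("),(" : String).toList = [')', ',', '('] from rfl]
    congr 1
    congr 1
    have hrow : ∀ x : String,
        (['('] ++ x.toList ++ [','] ++
          PySem.Chars.join ([')', ','] ++ ('(' :: (x.toList ++ [',']))) (set2.map String.toList) ++ [')'])
        = PySem.Chars.join [','] ((set2.map String.toList).map
            (fun y => ['('] ++ x.toList ++ [','] ++ y ++ [')'])) := by
      intro x
      exact row_sep x.toList (set2.map String.toList) (by simpa using h2)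
    have hmap : (set1.flatMap (fun x => set2.map (fun y => "(" ++ x ++ "," ++ y ++ ")"))).map String.toList
        = set1.flatMap (fun x => (set2.map String.toList).map
            (fun y => ['('] ++ x.toList ++ [','] ++ y ++ [')'])) := by
      rw [List.map_flatMap]
      refine flatMap_congr_mem ?_
      intro x _
      simp [List.map_map, Function.comp_def]
    rw [hmap, join_groups _ _ (by intro x _; simpa using h2)]
    refine congrArg _ (List.map_congr_left ?_)
    intro x _
    rw [← hrow x]
    simp [List.append_assoc]

-- ===== VERDICT (by name: the statement is the Claim_ definition above) =====
theorem relationcreator_spec : Claim_equal_relationcreator := by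
  intro set1 set2 _
  unfold Spec_relationcreator
  rw [A_eq_pairsJoin, B_eq_pairsJoin]
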